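-- pv_equiv track=rewrite | github.com/mnlx/oikos-scrapper | src/oikos_scraper/strategies/embedded_data.py | _listing_score
-- ===== SOURCE A (Python) =====
-- def _listing_score(raw: dict) -> int:
--     keys = {key.lower() for key in raw.keys()}
--     score = 0
--     if "id" in keys:
--         score += 3
--     if "url" in keys or "link" in keys:
--         score += 3
--     if "title" in keys or "name" in keys:
--         score += 2
--     if any(key in keys for key in {"price", "pricinginfos", "rentprice", "saleprice", "totalcost"}):
--         score += 6
--     if any(key in keys for key in {"bedrooms", "bathrooms", "area", "usablearea", "usableareas"}):
--         score += 2
--     if any(key in keys for key in {"address", "city", "neighborhood", "geo", "coordinates"}):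
--         score += 2
--     return score
-- ===== SOURCE B (Python) =====
-- _KEY_GROUP = {
--     "id": 0,
--     "url": 1, "link": 1,
--     "title": 2, "name": 2,
--     "price": 3, "pricinginfos": 3, "rentprice": 3, "saleprice": 3, "totalcost": 3,
--     "bedrooms": 4, "bathrooms": 4, "area": 4, "usablearea": 4, "usableareas": 4,
--     "address": 5, "city": 5, "neighborhood": 5, "geo": 5, "coordinates": 5,
-- }
--
-- _GROUP_POINTS = {0: 3, 1: 3, 2: 2, 3: 6, 4: 2, 5: 2}
--
--
-- def _listing_score(raw: dict) -> int:
--     matched = set()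
--     for key in raw.keys():
--         group = _KEY_GROUP.get(key.lower())
--         if group is not None:
--             matched.add(group)
--     return sum(_GROUP_POINTS[g] for g in matched)
-- ===== Notes on version B (the rewrite author's own statement) =====
-- stated objective: alternative
-- what changed: Replaces the six hard-coded per-group membership tests against a set of lowercased keys by a prebuilt reverse-lookup dict (candidate key -> group id) plus a points table: one pass over raw's keys collects the set of matched group ids, and the score is the sum of the points of the matched groups.
import Mathlib
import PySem

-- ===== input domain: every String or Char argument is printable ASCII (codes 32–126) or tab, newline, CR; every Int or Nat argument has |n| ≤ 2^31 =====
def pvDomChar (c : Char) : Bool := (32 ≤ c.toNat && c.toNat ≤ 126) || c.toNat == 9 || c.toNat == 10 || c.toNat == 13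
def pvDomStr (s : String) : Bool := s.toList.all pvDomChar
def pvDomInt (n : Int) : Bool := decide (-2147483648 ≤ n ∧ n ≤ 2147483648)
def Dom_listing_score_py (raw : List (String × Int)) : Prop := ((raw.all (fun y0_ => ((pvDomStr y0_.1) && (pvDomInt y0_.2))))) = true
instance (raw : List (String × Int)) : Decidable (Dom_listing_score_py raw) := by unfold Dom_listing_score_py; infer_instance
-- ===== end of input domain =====

-- B replaces A's six per-group membership scans by a reverse-lookup index (key -> group id)
-- and one pass over the keys collecting matched group ids; alternative structure, same cost.

-- ===== PORT A =====
-- Python's `any(key in keys for key in {…})` only tests membership of each literal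
-- element, so the set literal is ported as the list of its elements.
def listing_score_py (raw : List (String × Int)) : Int :=
  let keys : PySem.Set String := PySem.Set.ofList (raw.map (fun key => PySem.Str.lower key.1))
  let score : Int := 0
  let score := if PySem.Set.contains keys "id" then score + 3 else score
  let score := if PySem.Set.contains keys "url" || PySem.Set.contains keys "link" then score + 3 else score
  let score := if PySem.Set.contains keys "title" || PySem.Set.contains keys "name" then score + 2 else score
  let score := if ([ "price", "pricinginfos", "rentprice", "saleprice", "totalcost" ] : List String).any (fun key => PySem.Set.contains keys key) then score + 6 else score
  let score := if ([ "bedrooms", "bathrooms", "area", "usablearea", "usableareas" ] : List String).any (fun key => PySem.Set.contains keys key) then score + 2 else score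
  let score := if ([ "address", "city", "neighborhood", "geo", "coordinates" ] : List String).any (fun key => PySem.Set.contains keys key) then score + 2 else score
  score

-- ===== PORT B =====
def pvKeyGroup : PySem.Dict String Int := PySem.Dict.ofList
  [("id", 0),
   ("url", 1), ("link", 1),
   ("title", 2), ("name", 2),
   ("price", 3), ("pricinginfos", 3), ("rentprice", 3), ("saleprice", 3), ("totalcost", 3),
   ("bedrooms", 4), ("bathrooms", 4), ("area", 4), ("usablearea", 4), ("usableareas", 4),
   ("address", 5), ("city", 5), ("neighborhood", 5), ("geo", 5), ("coordinates", 5)]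

def pvGroupPoints : PySem.Dict Int Int :=
  PySem.Dict.ofList [(0, 3), (1, 3), (2, 2), (3, 6), (4, 2), (5, 2)]

-- `_GROUP_POINTS[g]`: g always comes from pvKeyGroup, so the lookup always succeeds;
-- `.getD 0` is the total rendering of that never-raising subscript.  Python sums the
-- matched set in set order; integer addition is commutative, so List.sum is exact.
def listing_score_py_alt (raw : List (String × Int)) : Int :=
  let matched : PySem.Set Int :=
    raw.foldl (fun matched key =>
      match PySem.Dict.get? pvKeyGroup (PySem.Str.lower key.1) with
      | some group => PySem.Set.add matched group
      | none => matched) PySem.Set.empty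
  (matched.map (fun g => (PySem.Dict.get? pvGroupPoints g).getD 0)).sum

-- ===== PRECONDITION & SPEC =====
def Spec_listing_score_py (raw : List (String × Int)) (out : Int) : Prop := out = listing_score_py_alt raw
instance (raw : List (String × Int)) (out : Int) : Decidable (Spec_listing_score_py raw out) := by unfold Spec_listing_score_py; infer_instance

-- ===== CLAIM (what is proved, stated in full; the proofs are below) =====
def Claim_equal_listing_score_py : Prop := ∀ (raw : List (String × Int)), Dom_listing_score_py raw → Spec_listing_score_py raw (listing_score_py raw)

-- ===== LEMMAS AND PROOFS =====

theorem pv_ite_add {b : Prop} [Decidable b] (x c : Int) :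
    (if b then x + c else x) = x + (if b then c else 0) := by
  split_ifs <;> omega

theorem pv_keys_nodup : pvKeyGroup.keys.Nodup := by decide

theorem pv_get_iff (k : String) (v : Int) : PySem.Dict.get? pvKeyGroup k = some v ↔ (k, v) ∈
    [("id", (0 : Int)),
     ("url", 1), ("link", 1),
     ("title", 2), ("name", 2),
     ("price", 3), ("pricinginfos", 3), ("rentprice", 3), ("saleprice", 3), ("totalcost", 3),
     ("bedrooms", 4), ("bathrooms", 4), ("area", 4), ("usablearea", 4), ("usableareas", 4),
     ("address", 5), ("city", 5), ("neighborhood", 5), ("geo", 5), ("coordinates", 5)] := by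
  rw [PySem.Dict.get?_eq_some_iff_mem_items _ _ _ pv_keys_nodup]
  rw [show pvKeyGroup.items = [("id", (0 : Int)),
     ("url", 1), ("link", 1),
     ("title", 2), ("name", 2),
     ("price", 3), ("pricinginfos", 3), ("rentprice", 3), ("saleprice", 3), ("totalcost", 3),
     ("bedrooms", 4), ("bathrooms", 4), ("area", 4), ("usablearea", 4), ("usableareas", 4),
     ("address", 5), ("city", 5), ("neighborhood", 5), ("geo", 5), ("coordinates", 5)] from rfl]

theorem pv_char0 (k : String) : PySem.Dict.get? pvKeyGroup k = some 0 ↔ k ∈ (["id"] : List String) := by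
  rw [pv_get_iff]; simp [Prod.ext_iff]

theorem pv_char1 (k : String) : PySem.Dict.get? pvKeyGroup k = some 1 ↔ k ∈ (["url", "link"] : List String) := by
  rw [pv_get_iff]; simp [Prod.ext_iff]

theorem pv_char2 (k : String) : PySem.Dict.get? pvKeyGroup k = some 2 ↔ k ∈ (["title", "name"] : List String) := by
  rw [pv_get_iff]; simp [Prod.ext_iff]

theorem pv_char3 (k : String) : PySem.Dict.get? pvKeyGroup k = some 3 ↔ k ∈ (["price", "pricinginfos", "rentprice", "saleprice", "totalcost"] : List String) := by
  rw [pv_get_iff]; simp [Prod.ext_iff]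

theorem pv_char4 (k : String) : PySem.Dict.get? pvKeyGroup k = some 4 ↔ k ∈ (["bedrooms", "bathrooms", "area", "usablearea", "usableareas"] : List String) := by
  rw [pv_get_iff]; simp [Prod.ext_iff]

theorem pv_char5 (k : String) : PySem.Dict.get? pvKeyGroup k = some 5 ↔ k ∈ (["address", "city", "neighborhood", "geo", "coordinates"] : List String) := by
  rw [pv_get_iff]; simp [Prod.ext_iff]

theorem pv_fold_eq (l : List (String × Int)) (s : PySem.Set Int) :
    List.foldl (fun matched key =>
      match PySem.Dict.get? pvKeyGroup (PySem.Str.lower key.1) with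
      | some group => PySem.Set.add matched group
      | none => matched) s l
    = List.foldl PySem.Set.add s
        (l.filterMap (fun key => PySem.Dict.get? pvKeyGroup (PySem.Str.lower key.1))) := by
  induction l generalizing s with
  | nil => rfl
  | cons hd tl ih =>
    simp only [List.foldl_cons, List.filterMap_cons]
    cases h : PySem.Dict.get? pvKeyGroup (PySem.Str.lower hd.1) <;> simp [ih]

theorem pv_gids_sub (raw : List (String × Int)) :
    ∀ x ∈ raw.filterMap (fun key => PySem.Dict.get? pvKeyGroup (PySem.Str.lower key.1)),
      x ∈ ([0, 1, 2, 3, 4, 5] : List Int) := by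
  intro x hx
  rcases List.mem_filterMap.mp hx with ⟨p, -, hsome⟩
  have h := (pv_get_iff _ _).mp hsome
  simp only [List.mem_cons, Prod.mk.injEq, List.not_mem_nil, or_false] at h
  rcases h with ⟨-, rfl⟩|⟨-, rfl⟩|⟨-, rfl⟩|⟨-, rfl⟩|⟨-, rfl⟩|⟨-, rfl⟩|⟨-, rfl⟩|⟨-, rfl⟩|⟨-, rfl⟩|⟨-, rfl⟩|⟨-, rfl⟩|⟨-, rfl⟩|⟨-, rfl⟩|⟨-, rfl⟩|⟨-, rfl⟩|⟨-, rfl⟩|⟨-, rfl⟩|⟨-, rfl⟩|⟨-, rfl⟩|⟨-, rfl⟩ <;> decide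

theorem pv_filter_sum (p : Int → Bool) (f : Int → Int) (x : Int) (xs : List Int) :
    (List.map f (List.filter p (x :: xs))).sum
      = (if p x then f x else 0) + (List.map f (List.filter p xs)).sum := by
  by_cases h : p x <;> simp [h]

theorem pv_sum_set (S : List Int) (f : Int → Int) (hnd : S.Nodup)
    (hsub : ∀ x ∈ S, x ∈ ([0, 1, 2, 3, 4, 5] : List Int)) :
    (List.map f S).sum =
      (if (0 : Int) ∈ S then f 0 else 0) + (if (1 : Int) ∈ S then f 1 else 0) +
      (if (2 : Int) ∈ S then f 2 else 0) + (if (3 : Int) ∈ S then f 3 else 0) +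
      (if (4 : Int) ∈ S then f 4 else 0) + (if (5 : Int) ∈ S then f 5 else 0) := by
  have hTnd : (List.filter (fun g => decide (g ∈ S)) ([0, 1, 2, 3, 4, 5] : List Int)).Nodup :=
    List.Nodup.filter _ (by decide)
  have hperm : S.Perm (List.filter (fun g => decide (g ∈ S)) ([0, 1, 2, 3, 4, 5] : List Int)) := by
    rw [List.perm_ext_iff_of_nodup hnd hTnd]
    intro a
    simp only [List.mem_filter, decide_eq_true_eq]
    exact ⟨fun ha => ⟨hsub a ha, ha⟩, fun h => h.2⟩
  rw [List.Perm.sum_eq (hperm.map f)]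
  rw [pv_filter_sum, pv_filter_sum, pv_filter_sum, pv_filter_sum, pv_filter_sum, pv_filter_sum]
  simp only [decide_eq_true_eq, List.filter_nil, List.map_nil, List.sum_nil, add_zero]
  ring

theorem pv_mem_gen (g : Int) (raw : List (String × Int)) (cs : List String)
    (hchar : ∀ k, PySem.Dict.get? pvKeyGroup k = some g ↔ k ∈ cs) :
    (g ∈ raw.filterMap (fun key => PySem.Dict.get? pvKeyGroup (PySem.Str.lower key.1)))
      ↔ ∃ c ∈ cs, c ∈ raw.map (fun key => PySem.Str.lower key.1) := by
  constructor
  · intro h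
    rcases List.mem_filterMap.mp h with ⟨p, hp, hs⟩
    exact ⟨_, (hchar _).mp hs, List.mem_map.mpr ⟨p, hp, rfl⟩⟩
  · rintro ⟨c, hc, hm⟩
    rcases List.mem_map.mp hm with ⟨p, hp, rfl⟩
    exact List.mem_filterMap.mpr ⟨p, hp, (hchar _).mpr hc⟩

theorem pv_mem0 (raw : List (String × Int)) :
    ((0 : Int) ∈ raw.filterMap (fun key => PySem.Dict.get? pvKeyGroup (PySem.Str.lower key.1)))
      ↔ "id" ∈ raw.map (fun key => PySem.Str.lower key.1) :=
  (pv_mem_gen 0 raw _ pv_char0).trans (by simp)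

theorem pv_mem1 (raw : List (String × Int)) :
    ((1 : Int) ∈ raw.filterMap (fun key => PySem.Dict.get? pvKeyGroup (PySem.Str.lower key.1)))
      ↔ "url" ∈ raw.map (fun key => PySem.Str.lower key.1) ∨ "link" ∈ raw.map (fun key => PySem.Str.lower key.1) :=
  (pv_mem_gen 1 raw _ pv_char1).trans (by simp)

theorem pv_mem2 (raw : List (String × Int)) :
    ((2 : Int) ∈ raw.filterMap (fun key => PySem.Dict.get? pvKeyGroup (PySem.Str.lower key.1)))
      ↔ "title" ∈ raw.map (fun key => PySem.Str.lower key.1) ∨ "name" ∈ raw.map (fun key => PySem.Str.lower key.1) :=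
  (pv_mem_gen 2 raw _ pv_char2).trans (by simp)

theorem pv_mem3 (raw : List (String × Int)) :
    ((3 : Int) ∈ raw.filterMap (fun key => PySem.Dict.get? pvKeyGroup (PySem.Str.lower key.1)))
      ↔ "price" ∈ raw.map (fun key => PySem.Str.lower key.1) ∨ "pricinginfos" ∈ raw.map (fun key => PySem.Str.lower key.1) ∨ "rentprice" ∈ raw.map (fun key => PySem.Str.lower key.1) ∨ "saleprice" ∈ raw.map (fun key => PySem.Str.lower key.1) ∨ "totalcost" ∈ raw.map (fun key => PySem.Str.lower key.1) :=
  (pv_mem_gen 3 raw _ pv_char3).trans (by simp [or_and_right, exists_or, and_comm])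

theorem pv_mem4 (raw : List (String × Int)) :
    ((4 : Int) ∈ raw.filterMap (fun key => PySem.Dict.get? pvKeyGroup (PySem.Str.lower key.1)))
      ↔ "bedrooms" ∈ raw.map (fun key => PySem.Str.lower key.1) ∨ "bathrooms" ∈ raw.map (fun key => PySem.Str.lower key.1) ∨ "area" ∈ raw.map (fun key => PySem.Str.lower key.1) ∨ "usablearea" ∈ raw.map (fun key => PySem.Str.lower key.1) ∨ "usableareas" ∈ raw.map (fun key => PySem.Str.lower key.1) :=
  (pv_mem_gen 4 raw _ pv_char4).trans (by simp [or_and_right, exists_or, and_comm])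

theorem pv_mem5 (raw : List (String × Int)) :
    ((5 : Int) ∈ raw.filterMap (fun key => PySem.Dict.get? pvKeyGroup (PySem.Str.lower key.1)))
      ↔ "address" ∈ raw.map (fun key => PySem.Str.lower key.1) ∨ "city" ∈ raw.map (fun key => PySem.Str.lower key.1) ∨ "neighborhood" ∈ raw.map (fun key => PySem.Str.lower key.1) ∨ "geo" ∈ raw.map (fun key => PySem.Str.lower key.1) ∨ "coordinates" ∈ raw.map (fun key => PySem.Str.lower key.1) :=
  (pv_mem_gen 5 raw _ pv_char5).trans (by simp [or_and_right, exists_or, and_comm])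

theorem pv_p0 : (PySem.Dict.get? pvGroupPoints 0).getD 0 = 3 := rfl
theorem pv_p1 : (PySem.Dict.get? pvGroupPoints 1).getD 0 = 3 := rfl
theorem pv_p2 : (PySem.Dict.get? pvGroupPoints 2).getD 0 = 2 := rfl
theorem pv_p3 : (PySem.Dict.get? pvGroupPoints 3).getD 0 = 6 := rfl
theorem pv_p4 : (PySem.Dict.get? pvGroupPoints 4).getD 0 = 2 := rfl
theorem pv_p5 : (PySem.Dict.get? pvGroupPoints 5).getD 0 = 2 := rfl

theorem pv_main (raw : List (String × Int)) : listing_score_py raw = listing_score_py_alt raw := by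
  simp only [listing_score_py, listing_score_py_alt, pv_ite_add, zero_add, List.any_cons,
    List.any_nil, Bool.or_eq_true, PySem.Set.contains_iff, PySem.Set.mem_ofList,
    Bool.false_eq_true, or_false]
  rw [pv_fold_eq]
  rw [show (PySem.Set.empty : PySem.Set Int) = [] from rfl]
  rw [← PySem.Set.ofList_eq_foldl]
  rw [pv_sum_set _ _ (PySem.Set.nodup_ofList _)
    (fun x hx => pv_gids_sub raw x ((PySem.Set.mem_ofList _ _).mp hx))]
  simp only [pv_p0, pv_p1, pv_p2, pv_p3, pv_p4, pv_p5, PySem.Set.mem_ofList,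
    pv_mem0, pv_mem1, pv_mem2, pv_mem3, pv_mem4, pv_mem5]

-- ===== VERDICT (by name: the statement is the Claim_ definition above) =====
theorem listing_score_py_spec : Claim_equal_listing_score_py := by
  intro raw _
  show listing_score_py raw = listing_score_py_alt raw
  exact pv_main raw
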